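-- pv_equiv track=rewrite | github.com/davde342/Class-based-graph-anonymization | project/label_list.py | generate_prefix_pattern_lists
-- ===== SOURCE A (Python) =====
-- def generate_prefix_pattern_lists(class_nodes, k):
--     m = len(class_nodes)
--     generated_lists = []
--     for i in range(m):
--         current_list_set = set()
--         for j in range(k):
--             node_index = (i + j) % m
--             current_list_set.add(class_nodes[node_index])
--         generated_lists.append(sorted(current_list_set))
--
--     return generated_lists
-- ===== SOURCE B (Python) =====
-- def generate_prefix_pattern_lists(class_nodes, k):
--     m = len(class_nodes)
--     if k >= m:
--         # every cyclic k-window covers all m positions, so all rows are equal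
--         row = sorted(set(class_nodes))
--         return [list(row) for _ in range(m)]
--     kk = max(k, 0)
--     ext = class_nodes + class_nodes[:kk]
--     return [sorted(set(ext[i:i + kk])) for i in range(m)]
-- ===== Notes on version B (the rewrite author's own statement) =====
-- stated objective: alternative
-- what changed: Replaces per-row modular indexing over k positions by contiguous slices of the list extended with its own k-prefix, and when k >= m computes the single shared row sorted(set(class_nodes)) once instead of m times.
import Mathlib
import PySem

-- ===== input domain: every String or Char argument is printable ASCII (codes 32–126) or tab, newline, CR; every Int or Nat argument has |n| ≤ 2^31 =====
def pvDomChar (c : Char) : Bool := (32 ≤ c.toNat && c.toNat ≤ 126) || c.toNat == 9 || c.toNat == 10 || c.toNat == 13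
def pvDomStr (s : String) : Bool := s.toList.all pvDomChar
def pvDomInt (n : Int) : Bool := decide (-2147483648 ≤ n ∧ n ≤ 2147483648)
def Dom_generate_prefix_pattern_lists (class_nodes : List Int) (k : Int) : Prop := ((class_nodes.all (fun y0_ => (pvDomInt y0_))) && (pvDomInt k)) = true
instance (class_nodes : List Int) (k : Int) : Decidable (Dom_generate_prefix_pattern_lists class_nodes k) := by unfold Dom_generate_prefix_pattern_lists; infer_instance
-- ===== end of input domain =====

-- B builds each row from a contiguous slice of the list extended with its own k-prefix
-- (and computes the single shared row once when k >= m) instead of A's per-row modular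
-- indexing of k positions; objective: alternative.

-- ===== PORT A =====
def generate_prefix_pattern_lists (class_nodes : List Int) (k : Int) : List (List Int) :=
  let m : Int := PySem.List.len class_nodes
  (PySem.List.pyRange 0 m 1).foldl
    (fun generated_lists i =>
      let current_list_set : PySem.Set Int :=
        (PySem.List.pyRange 0 k 1).foldl
          (fun s j =>
            let node_index := PySem.Int.mod (i + j) m
            -- class_nodes[node_index]: node_index = (i+j) % m lies in [0, m), so pyGetD is exact
            PySem.Set.add s (PySem.List.pyGetD class_nodes node_index 0))
          PySem.Set.empty
      generated_lists ++ [PySem.List.sorted current_list_set (fun x => x)])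
    []

-- ===== PORT B =====
def generate_prefix_pattern_lists_alt (class_nodes : List Int) (k : Int) : List (List Int) :=
  let m : Int := PySem.List.len class_nodes
  if k ≥ m then
    let row := PySem.List.sorted (PySem.Set.ofList class_nodes) (fun x => x)
    (PySem.List.pyRange 0 m 1).map (fun _ => row)
  else
    let kk : Int := max k 0
    let ext := class_nodes ++ PySem.List.slice class_nodes none (some kk)
    (PySem.List.pyRange 0 m 1).map (fun i =>
      PySem.List.sorted (PySem.Set.ofList (PySem.List.slice ext (some i) (some (i + kk)))) (fun x => x))

-- ===== PRECONDITION & SPEC =====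
def Spec_generate_prefix_pattern_lists (class_nodes : List Int) (k : Int) (out : List (List Int)) : Prop := out = generate_prefix_pattern_lists_alt class_nodes k
instance (class_nodes : List Int) (k : Int) (out : List (List Int)) : Decidable (Spec_generate_prefix_pattern_lists class_nodes k out) := by unfold Spec_generate_prefix_pattern_lists; infer_instance

-- ===== CLAIM (what is proved, stated in full; the proofs are below) =====
def Claim_equal_generate_prefix_pattern_lists : Prop := ∀ (class_nodes : List Int) (k : Int), Dom_generate_prefix_pattern_lists class_nodes k → Spec_generate_prefix_pattern_lists class_nodes k (generate_prefix_pattern_lists class_nodes k)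

-- ===== LEMMAS AND PROOFS =====

-- the append-accumulator loop is List.map
theorem pv_foldl_append_map {α β : Type} (g : α → β) :
    ∀ (L : List α) (acc : List β), L.foldl (fun a i => a ++ [g i]) acc = acc ++ L.map g := by
  intro L
  induction L with
  | nil => intro acc; simp
  | cons x t ih => intro acc; simp [ih]

-- A's inner loop builds set([f(j) for j in range(k)])
theorem pv_foldl_add_eq_ofList {α β : Type} [BEq α] (f : β → α) (L : List β) :
    L.foldl (fun s j => PySem.Set.add s (f j)) PySem.Set.empty = PySem.Set.ofList (L.map f) := by
  rw [PySem.Set.ofList_eq_foldl, List.foldl_map]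
  rfl

-- A's window of row i, as a list
def pvWinA (class_nodes : List Int) (k i : Int) : List Int :=
  (PySem.List.pyRange 0 k 1).map
    (fun j => PySem.List.pyGetD class_nodes (PySem.Int.mod (i + j) (PySem.List.len class_nodes)) 0)

theorem pv_A_eq_map (class_nodes : List Int) (k : Int) :
    generate_prefix_pattern_lists class_nodes k =
      (PySem.List.pyRange 0 (PySem.List.len class_nodes) 1).map
        (fun i => PySem.List.sorted (PySem.Set.ofList (pvWinA class_nodes k i)) (fun x => x)) := by
  unfold generate_prefix_pattern_lists
  simp only [pv_foldl_add_eq_ofList, pv_foldl_append_map, pvWinA]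
  simp

-- sorted of two sets with the same members agree
theorem pv_sorted_set_congr (s t : List Int)
    (h : ∀ x, x ∈ PySem.Set.ofList s ↔ x ∈ PySem.Set.ofList t) :
    PySem.List.sorted (PySem.Set.ofList s) (fun x => x) =
      PySem.List.sorted (PySem.Set.ofList t) (fun x => x) := by
  apply PySem.List.sorted_eq_sorted_of_perm _ _ _ (fun a b hab => hab)
  exact (List.perm_ext_iff_of_nodup (PySem.Set.nodup_ofList s) (PySem.Set.nodup_ofList t)).2 h

-- case k ≥ m: A's window has the same members as class_nodes
theorem pv_mem_winA_of_ge (class_nodes : List Int) (k i : Int)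
    (hi0 : 0 ≤ i) (him : i < PySem.List.len class_nodes)
    (hk : k ≥ PySem.List.len class_nodes) (x : Int) :
    x ∈ pvWinA class_nodes k i ↔ x ∈ class_nodes := by
  have hm : (0:Int) < PySem.List.len class_nodes := lt_of_le_of_lt hi0 him
  have hlen : PySem.List.len class_nodes = (class_nodes.length : Int) := by
    simp [PySem.List.len]
  constructor
  · intro hx
    simp only [pvWinA, List.mem_map] at hx
    obtain ⟨j, hj, hfx⟩ := hx
    rw [PySem.List.mem_pyRange_one] at hj
    have h0 := PySem.Int.mod_nonneg (i + j) hm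
    have h1 := PySem.Int.mod_lt (i + j) hm
    rw [PySem.List.pyGetD_eq_getElem class_nodes 0 h0 (by omega)] at hfx
    exact hfx ▸ List.getElem_mem _
  · intro hx
    obtain ⟨p, hp, hpx⟩ := List.getElem_of_mem hx
    simp only [pvWinA, List.mem_map]
    refine ⟨PySem.Int.mod ((p : Int) - i) (PySem.List.len class_nodes), ?_, ?_⟩
    · rw [PySem.List.mem_pyRange_one]
      have h0 := PySem.Int.mod_nonneg ((p : Int) - i) hm
      have h1 := PySem.Int.mod_lt ((p : Int) - i) hm
      omega
    · have hp' : (p : Int) < PySem.List.len class_nodes := by omega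
      have hmod : PySem.Int.mod (i + PySem.Int.mod ((p : Int) - i) (PySem.List.len class_nodes))
          (PySem.List.len class_nodes) = (p : Int) := by
        rw [PySem.Int.mod_eq_emod_of_pos hm, PySem.Int.mod_eq_emod_of_pos hm]
        calc (i + ((p : Int) - i) % PySem.List.len class_nodes) % PySem.List.len class_nodes
            = (i % PySem.List.len class_nodes + ((p : Int) - i) % PySem.List.len class_nodes % PySem.List.len class_nodes) % PySem.List.len class_nodes := by
              rw [Int.add_emod]
          _ = (i % PySem.List.len class_nodes + ((p : Int) - i) % PySem.List.len class_nodes) % PySem.List.len class_nodes := by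
              rw [Int.emod_emod_of_dvd _ dvd_rfl]
          _ = (i + ((p : Int) - i)) % PySem.List.len class_nodes := by rw [← Int.add_emod]
          _ = (p : Int) % PySem.List.len class_nodes := by ring_nf
          _ = (p : Int) := Int.emod_eq_of_lt (by omega) hp'
      rw [hmod, PySem.List.pyGetD_eq_getElem class_nodes 0 (by omega) (by omega)]
      simpa using hpx
  
-- case k < m: A's window IS B's slice
theorem pv_winA_eq_slice (class_nodes : List Int) (k i : Int)
    (hi0 : 0 ≤ i) (him : i < PySem.List.len class_nodes)
    (hk : k < PySem.List.len class_nodes) :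
    pvWinA class_nodes k i =
      PySem.List.slice (class_nodes ++ PySem.List.slice class_nodes none (some (max k 0)))
        (some i) (some (i + max k 0)) := by
  have hlen : PySem.List.len class_nodes = (class_nodes.length : Int) := by
    simp [PySem.List.len]
  rw [hlen] at him hk
  obtain ⟨i', rfl⟩ : ∃ i' : ℕ, i = (i' : Int) := ⟨i.toNat, (Int.toNat_of_nonneg hi0).symm⟩
  have hi' : i' < class_nodes.length := by exact_mod_cast him
  by_cases hk0 : k ≤ 0
  · have hmax : max k 0 = ((0:ℕ) : Int) := by simp; omega
    rw [hmax, PySem.List.slice_natCast_add]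
    unfold pvWinA
    rw [PySem.List.pyRange_one_eq_nil hk0]
    simp
  · have hmax : max k 0 = k := by omega
    rw [hmax]
    obtain ⟨k'', rfl⟩ : ∃ k'' : ℕ, k = (k'' : Int) := ⟨k.toNat, (Int.toNat_of_nonneg (by omega)).symm⟩
    have hk'' : k'' < class_nodes.length := by exact_mod_cast hk
    rw [PySem.List.slice_to_natCast, PySem.List.slice_natCast_add]
    unfold pvWinA
    rw [hlen, PySem.List.pyRange_zero_natCast, List.map_map]
    apply List.ext_getElem
    · simp; omega
    · intro j hj1 hj2
      have hj : j < k'' := by simpa using hj1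
      simp only [List.getElem_map, List.getElem_range, Function.comp]
      have hcast : ((i' : Int) + (j : Int)) = ((i' + j : ℕ) : Int) := by push_cast; ring
      rw [hcast, PySem.Int.mod_natCast, PySem.List.pyGetD_natCast]
      rw [List.getElem_take, List.getElem_drop]
      rcases lt_or_ge (i' + j) class_nodes.length with h | h
      · rw [Nat.mod_eq_of_lt h, List.getElem_append_left]
        exact List.getD_eq_getElem _ _ h
      · have h2 : i' + j - class_nodes.length < k'' := by omega
        have hmod : (i' + j) % class_nodes.length = i' + j - class_nodes.length := by
          rw [Nat.mod_eq_sub_mod h, Nat.mod_eq_of_lt (by omega)]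
        rw [hmod, List.getElem_append_right (by omega), List.getElem_take]
        exact List.getD_eq_getElem _ _ (by omega)

-- ===== VERDICT (by name: the statement is the Claim_ definition above) =====
theorem generate_prefix_pattern_lists_spec : Claim_equal_generate_prefix_pattern_lists := by
  intro class_nodes k _
  unfold Spec_generate_prefix_pattern_lists generate_prefix_pattern_lists_alt
  rw [pv_A_eq_map]
  by_cases hk : k ≥ PySem.List.len class_nodes
  · simp only [hk, if_pos]
    apply List.map_congr_left
    intro i hi
    rw [PySem.List.mem_pyRange_one] at hi
    exact pv_sorted_set_congr _ _ (fun x => by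
      rw [PySem.Set.mem_ofList, PySem.Set.mem_ofList,
        pv_mem_winA_of_ge class_nodes k i hi.1 hi.2 hk x])
  · simp only [hk, if_false]
    apply List.map_congr_left
    intro i hi
    rw [PySem.List.mem_pyRange_one] at hi
    rw [pv_winA_eq_slice class_nodes k i hi.1 hi.2 (by omega)]
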